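-- pv_equiv track=rewrite | github.com/hujaev/pyModbusTCP | smsutils.py | ByteToBitsString
-- ===== SOURCE A (Python) =====
-- def ByteToBitsString(byte, n):
--     result = ''
--     for i in range(0,n):
--         if byte & (1 << i) != 0:
--             result = '1' + result
--         else:
--             result = '0' + result
--     return result
-- ===== SOURCE B (Python) =====
-- def ByteToBitsString(byte, n):
--     if n <= 0:
--         return ''
--     masked = byte & ((1 << n) - 1)
--     return format(masked, '0%db' % n)
-- ===== Notes on version B (the rewrite author's own statement) =====
-- stated objective: idiomatic
-- what changed: replaces A's per-bit test-and-prepend loop by masking the low n bits once (byte & ((1<<n)-1)) and emitting them with a single fixed-width binary format call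
import Mathlib
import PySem

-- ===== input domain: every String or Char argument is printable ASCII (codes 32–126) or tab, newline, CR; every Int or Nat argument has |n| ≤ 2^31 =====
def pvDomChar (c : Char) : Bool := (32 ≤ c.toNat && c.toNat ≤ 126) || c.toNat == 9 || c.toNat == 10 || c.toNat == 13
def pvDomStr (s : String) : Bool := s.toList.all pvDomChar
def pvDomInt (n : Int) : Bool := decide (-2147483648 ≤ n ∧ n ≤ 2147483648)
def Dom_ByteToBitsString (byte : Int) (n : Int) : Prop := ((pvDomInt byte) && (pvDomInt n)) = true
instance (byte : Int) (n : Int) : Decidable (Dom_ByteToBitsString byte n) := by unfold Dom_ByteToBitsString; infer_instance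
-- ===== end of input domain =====

-- B replaces A's per-bit prepend loop by one mask (byte & ((1<<n)-1)) plus a single
-- fixed-width binary formatting; objective: idiomatic. Equality of return values is proved.

-- ===== PORT A =====
-- a string is ported as its list of characters; '1' + result is the cons of '1'
def ByteToBitsString (byte : Int) (n : Int) : String :=
  String.mk ((PySem.List.pyRange 0 n 1).foldl
    (fun result i =>
      (if PySem.Int.band byte ((1 : Int) <<< (i.toNat : Nat)) ≠ 0 then '1' else '0') :: result) [])

-- ===== PORT B =====
-- pvBinDigits m = binary digits of m (MSB first, empty for 0); pvBinRepr = format(m, 'b');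
-- together with the left zero-padding below they are the exact meaning of format(masked, '0%db' % n)
def pvBinDigits (m : Nat) : List Char :=
  if _h : m = 0 then []
  else pvBinDigits (m / 2) ++ [if m % 2 = 1 then '1' else '0']
termination_by m
decreasing_by exact Nat.div_lt_self (Nat.pos_of_ne_zero _h) (by omega)

def pvBinRepr (m : Nat) : List Char := if m = 0 then ['0'] else pvBinDigits m

def ByteToBitsString_alt (byte : Int) (n : Int) : String :=
  if n ≤ 0 then ""
  else
    let masked := PySem.Int.band byte (((1 : Int) <<< (n.toNat : Nat)) - 1)
    let ds := pvBinRepr masked.toNat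
    String.mk (List.replicate (n.toNat - ds.length) '0' ++ ds)

-- ===== PRECONDITION & SPEC =====
def Spec_ByteToBitsString (byte : Int) (n : Int) (out : String) : Prop := out = ByteToBitsString_alt byte n
instance (byte : Int) (n : Int) (out : String) : Decidable (Spec_ByteToBitsString byte n out) := by unfold Spec_ByteToBitsString; infer_instance

-- ===== CLAIM (what is proved, stated in full; the proofs are below) =====
def Claim_equal_ByteToBitsString : Prop := ∀ (byte : Int) (n : Int), Dom_ByteToBitsString byte n → Spec_ByteToBitsString byte n (ByteToBitsString byte n)

-- ===== LEMMAS AND PROOFS =====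

-- fixed-width binary of m (k bits, MSB first)
def pvG : Nat → Nat → List Char
  | 0, _ => []
  | k+1, m => pvG k (m / 2) ++ [if m % 2 = 1 then '1' else '0']

lemma pvG_len (k : Nat) : ∀ m : Nat, (pvG k m).length = k := by
  induction k with
  | zero => intro m; rfl
  | succ k ih => intro m; simp [pvG, ih]

lemma pvG_zero (k : Nat) : pvG k 0 = List.replicate k '0' := by
  induction k with
  | zero => rfl
  | succ k ih => simp [pvG, ih, List.replicate_succ']

lemma pvG_peel (k : Nat) : ∀ m : Nat, pvG (k+1) m =
    (if (m / 2^k) % 2 = 1 then '1' else '0') :: pvG k (m % 2^k) := by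
  induction k with
  | zero => intro m; simp [pvG]
  | succ k ih =>
    intro m
    have h1 : (m % 2^(k+1)) / 2 = (m / 2) % 2^k := by
      rw [Nat.pow_succ, Nat.mul_comm, Nat.mod_mul_right_div_self]
    have h2 : (m % 2^(k+1)) % 2 = m % 2 := by
      exact Nat.mod_mod_of_dvd m (dvd_pow_self 2 (Nat.succ_ne_zero k))
    have h3 : m / 2 / 2^k = m / 2^(k+1) := by
      rw [Nat.div_div_eq_div_mul]; congr 1; ring
    calc pvG (k+2) m = pvG (k+1) (m / 2) ++ [if m % 2 = 1 then '1' else '0'] := rfl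
      _ = ((if ((m/2) / 2^k) % 2 = 1 then '1' else '0') :: pvG k ((m/2) % 2^k))
            ++ [if m % 2 = 1 then '1' else '0'] := by rw [ih]
      _ = (if (m / 2^(k+1)) % 2 = 1 then '1' else '0') :: pvG (k+1) (m % 2^(k+1)) := by
            rw [h3]; simp [pvG, h1, h2]

lemma pvG_pad (k : Nat) : ∀ j m : Nat, j ≤ k → m < 2^j →
    pvG k m = List.replicate (k - j) '0' ++ pvG j m := by
  induction k with
  | zero => intro j m hj _; interval_cases j; simp
  | succ k ih =>
    intro j m hj hm
    rcases Nat.eq_or_lt_of_le hj with h | h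
    · subst h; simp
    · have hjk : j ≤ k := by omega
      have hmk : m < 2^k := lt_of_lt_of_le hm (Nat.pow_le_pow_right (by omega) hjk)
      rw [pvG_peel]
      rw [Nat.div_eq_of_lt hmk, Nat.mod_eq_of_lt hmk]
      rw [ih j m hjk hm]
      have : k + 1 - j = (k - j) + 1 := by omega
      simp [this, List.replicate_succ]

lemma negSucc_emod (m k : Nat) :
    (Int.negSucc m) % ((2^k : Nat) : Int) = ((2^k - 1 - m % 2^k : Nat) : Int) := by
  have hP := Nat.two_pow_pos k
  obtain ⟨q, r, hr, hm⟩ : ∃ q r, r < 2^k ∧ m = 2^k * q + r :=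
    ⟨m / 2^k, m % 2^k, Nat.mod_lt _ hP, (Nat.div_add_mod m (2^k)).symm⟩
  subst hm
  have hmod : (2^k * q + r) % 2^k = r := by
    rw [Nat.mul_add_mod, Nat.mod_eq_of_lt hr]
  rw [hmod]
  have key : (Int.negSucc (2^k * q + r)) =
      ((2^k - 1 - r : Nat) : Int) + ((2^k : Nat) : Int) * (-(q : Int) - 1) := by
    rw [Int.negSucc_eq]
    have hc : ((2^k - 1 - r : Nat) : Int) = ((2^k : Nat) : Int) - 1 - (r : Int) := by omega
    rw [hc]
    push_cast
    ring
  rw [key, Int.add_mul_emod_self_left]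
  exact Int.emod_eq_of_lt (by omega) (by omega)

lemma band_mask (a : Int) (k : Nat) :
    PySem.Int.band a (((2^k : Nat) : Int) - 1) = a % ((2^k : Nat) : Int) := by
  have hP := Nat.two_pow_pos k
  have hb : (0:Int) <= ((2^k : Nat) : Int) - 1 := by omega
  have htn : (((2^k : Nat) : Int) - 1).toNat = 2^k - 1 := by omega
  cases a with
  | ofNat m =>
    simp only [PySem.Int.band, Int.ofNat_eq_natCast, if_pos (Int.natCast_nonneg m), if_pos hb, htn,
      Int.toNat_natCast]
    rw [Nat.and_two_pow_sub_one_eq_mod]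
    exact_mod_cast rfl
  | negSucc m =>
    have hna : ¬ (0:Int) <= Int.negSucc m := by omega
    simp only [PySem.Int.band, if_neg hna, if_pos hb, htn]
    have hm : (-(Int.negSucc m) - 1).toNat = m := by
      rw [Int.negSucc_eq]; omega
    rw [hm, Nat.land_comm, Nat.and_two_pow_sub_one_eq_mod, negSucc_emod]

lemma band_two_pow (a : Int) (k : Nat) :
    (PySem.Int.band a ((2^k : Nat) : Int) ≠ 0) ↔ (((2^k : Nat) : Int) <= a % ((2^(k+1) : Nat) : Int)) := by
  have hP := Nat.two_pow_pos k
  have hb : (0:Int) <= ((2^k : Nat) : Int) := by omega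
  have h4 : (2:Nat)^(k+1) = 2^k * 2 := pow_succ 2 k
  cases a with
  | ofNat m =>
    have hmm : m % 2^(k+1) = m % 2^k + 2^k * (m / 2^k % 2) := by rw [h4]; exact Nat.mod_mul
    have h2 : m % 2^k < 2^k := Nat.mod_lt _ hP
    simp only [PySem.Int.band, Int.ofNat_eq_natCast, if_pos (Int.natCast_nonneg m), if_pos hb,
      Int.toNat_natCast, Nat.and_two_pow, Nat.toNat_testBit]
    rw [show ((m : Int)) % ((2^(k+1) : Nat) : Int) = ((m % 2^(k+1) : Nat) : Int) from by exact_mod_cast rfl]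
    rcases Nat.mod_two_eq_zero_or_one (m / 2^k) with hbit | hbit <;> rw [hbit] at hmm ⊢ <;> omega
  | negSucc m =>
    have hmm : m % 2^(k+1) = m % 2^k + 2^k * (m / 2^k % 2) := by rw [h4]; exact Nat.mod_mul
    have h2 : m % 2^k < 2^k := Nat.mod_lt _ hP
    have h5 : m % 2^(k+1) < 2^(k+1) := Nat.mod_lt _ (by omega)
    have hna : ¬ (0:Int) <= Int.negSucc m := by omega
    simp only [PySem.Int.band, if_neg hna, if_pos hb, Int.toNat_natCast]
    have hm : (-(Int.negSucc m) - 1).toNat = m := by rw [Int.negSucc_eq]; omega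
    rw [hm, Nat.two_pow_and, Nat.toNat_testBit, negSucc_emod]
    rcases Nat.mod_two_eq_zero_or_one (m / 2^k) with hbit | hbit <;> rw [hbit] at hmm ⊢ <;> omega

lemma foldA (byte : Int) (k : Nat) :
    (PySem.List.pyRange 0 (k : Int) 1).foldl
      (fun result i =>
        (if PySem.Int.band byte ((1 : Int) <<< (i.toNat : Nat)) ≠ 0 then '1' else '0') :: result) []
    = pvG k (byte % ((2^k : Nat) : Int)).toNat := by
  induction k with
  | zero =>
    rw [PySem.List.pyRange_one_eq_nil (by omega)]
    rfl
  | succ k ih =>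
    have hsplit : PySem.List.pyRange 0 ((k+1 : Nat) : Int) 1
        = PySem.List.pyRange 0 (k : Int) 1 ++ [(k : Int)] := by
      push_cast
      exact PySem.List.pyRange_one_succ_right (by positivity)
    rw [hsplit, List.foldl_append, ih]
    simp only [List.foldl_cons, List.foldl_nil, Int.toNat_natCast]
    have hpow : ((1 : Int) <<< (k : Nat)) = ((2^k : Nat) : Int) := by
      rw [Int.shiftLeft_eq, one_mul]; exact_mod_cast rfl
    simp only [hpow]
    have h4 : (2:Nat)^(k+1) = 2^k * 2 := pow_succ 2 k
    have hP : 0 < 2^k := Nat.two_pow_pos k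
    have hP1 : (0:Int) < ((2^(k+1) : Nat) : Int) := by omega
    set M : Nat := (byte % ((2^(k+1) : Nat) : Int)).toNat with hM
    have hMc : ((M : Nat) : Int) = byte % ((2^(k+1) : Nat) : Int) := by
      rw [hM]; exact Int.toNat_of_nonneg (Int.emod_nonneg byte (by omega))
    have hMlt : M < 2^(k+1) := by
      have := Int.emod_lt_of_pos byte hP1
      omega
    have hMmod : M % 2^k = (byte % ((2^k : Nat) : Int)).toNat := by
      have hdvd : ((2^k : Nat) : Int) ∣ ((2^(k+1) : Nat) : Int) :=
        Int.natCast_dvd_natCast.mpr ⟨2, h4⟩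
      have e0 := Int.emod_emod_of_dvd byte hdvd
      have e1 : ((M % 2^k : Nat) : Int) = ((M : Nat) : Int) % ((2^k : Nat) : Int) := by
        exact_mod_cast rfl
      rw [hMc, e0] at e1
      have e2 : (0:Int) <= byte % ((2^k : Nat) : Int) := Int.emod_nonneg byte (by omega)
      omega
    rw [pvG_peel, hMmod]
    congr 1
    have hmul2 : M < 2^k * 2 := by omega
    obtain ⟨q, hq, hq2⟩ : ∃ q, M / 2^k = q ∧ M = 2^k * q + M % 2^k :=
      ⟨M / 2^k, rfl, (Nat.div_add_mod M (2^k)).symm⟩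
    have hr : M % 2^k < 2^k := Nat.mod_lt _ hP
    have hqlt : q < 2 := by rw [← hq]; exact Nat.div_lt_of_lt_mul hmul2
    rw [hq]
    have hdiv : q % 2 = 1 ↔ 2^k <= M := by
      rcases (by omega : q = 0 ∨ q = 1) with h0 | h0 <;> subst h0 <;> omega
    have hbt := band_two_pow byte k
    by_cases hcond : PySem.Int.band byte ((2^k : Nat) : Int) ≠ 0
    · have hle := hbt.mp hcond
      rw [if_pos hcond, if_pos (by omega : q % 2 = 1)]
    · have hnle : ¬ (((2^k : Nat) : Int) <= byte % ((2^(k+1) : Nat) : Int)) :=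
        fun h => hcond (hbt.mpr h)
      rw [if_neg hcond, if_neg (by omega : ¬ q % 2 = 1)]

lemma binDigits_exact (k : Nat) : ∀ m : Nat, 2^k ≤ m → m < 2^(k+1) → pvBinDigits m = pvG (k+1) m := by
  induction k with
  | zero =>
    intro m h1 h2
    have hm : m = 1 := by omega
    subst hm
    rw [pvBinDigits]
    norm_num
    rw [pvBinDigits]
    simp [pvG]
  | succ k ih =>
    intro m h1 h2
    rw [pvBinDigits, dif_neg (by omega : ¬ m = 0)]
    have hd : pvBinDigits (m / 2) = pvG (k+1) (m / 2) := by
      apply ih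
      · rw [Nat.le_div_iff_mul_le (by omega)]
        calc 2^k * 2 = 2^(k+1) := by rw [pow_succ]
          _ ≤ m := h1
      · rw [Nat.div_lt_iff_lt_mul (by omega)]
        calc m < 2^(k+1+1) := h2
          _ = 2^(k+1) * 2 := by rw [pow_succ]
    rw [hd]; rfl

lemma pad_binRepr (k m : Nat) (hk : 0 < k) (hm : m < 2^k) :
    List.replicate (k - (pvBinRepr m).length) '0' ++ pvBinRepr m = pvG k m := by
  by_cases h0 : m = 0
  · subst h0
    simp only [pvBinRepr, if_true, pvG_zero]
    have : k = (k - 1) + 1 := by omega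
    rw [this]
    simp [List.replicate_succ']
  · have hlog1 : 2^(m.log2) ≤ m := Nat.log2_self_le h0
    have hlog2 : m < 2^(m.log2 + 1) := Nat.lt_log2_self
    have hjk : m.log2 + 1 ≤ k := by
      by_contra hc
      have : k ≤ m.log2 := by omega
      have : 2^k ≤ 2^(m.log2) := Nat.pow_le_pow_right (by omega) this
      omega
    have hrepr : pvBinRepr m = pvG (m.log2 + 1) m := by
      rw [pvBinRepr, if_neg h0]
      exact binDigits_exact m.log2 m hlog1 hlog2
    rw [hrepr, pvG_len, pvG_pad k (m.log2 + 1) m hjk hlog2]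

-- ===== VERDICT (by name: the statement is the Claim_ definition above) =====
theorem ByteToBitsString_spec : Claim_equal_ByteToBitsString := by
  intro byte n _
  unfold Spec_ByteToBitsString ByteToBitsString ByteToBitsString_alt
  by_cases hn : n ≤ 0
  · rw [if_pos hn, PySem.List.pyRange_one_eq_nil hn]
    rfl
  · rw [if_neg hn]
    have hn' : 0 < n := by omega
    obtain ⟨k, hk⟩ : ∃ k : Nat, n = (k : Int) := ⟨n.toNat, (Int.toNat_of_nonneg (by omega : (0:Int) <= n)).symm⟩
    subst hk
    have hk0 : 0 < k := by omega
    simp only [Int.toNat_natCast]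
    have hmaskarg : ((1 : Int) <<< (k : Nat)) - 1 = ((2^k : Nat) : Int) - 1 := by
      rw [Int.shiftLeft_eq, one_mul]; norm_cast
    rw [hmaskarg, band_mask, foldA]
    congr 1
    have hMlt : (byte % ((2^k : Nat) : Int)).toNat < 2^k := by
      have h1 := Int.emod_lt_of_pos byte (by positivity : (0:Int) < ((2^k : Nat) : Int))
      have h2 := Int.emod_nonneg byte (by positivity : ((2^k : Nat) : Int) ≠ 0)
      omega
    rw [pad_binRepr k _ hk0 hMlt]
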